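-- pv_equiv track=rewrite | github.com/veya2ztn/mltool | ModelArchi/SymmetryCNN.py | symmetry_config_fix
-- ===== SOURCE A (Python) =====
-- def symmetry_config_fix(kernel_size,stride,padding,dilation):
--     # when stride = 2, the k=3,s=2,p=1 CNN layer for even size input like (16,16) would destroy symmetry passing.
--     # we will force this case to right way, like (k,s,p) = (3,2,1) --> (2,2,0)
--     if not isinstance(kernel_size,int):
--         assert  kernel_size[0] == kernel_size[1]
--         kernel_size = kernel_size[0]
--     if not isinstance(stride,int):
--         assert  stride[0] == stride[1]
--         stride = stride[0]
--     if not isinstance(padding,int):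
--         assert  padding[0] == padding[1]
--         padding = padding[0]
--     if not isinstance(dilation,int):
--         assert  dilation[0] == dilation[1]
--         dilation = dilation[0]
--     if dilation>1:
--         return symmetry_config_fix(kernel_size,stride,padding,1)
--     if  (kernel_size-1)*dilation != 2*padding + stride -1:
--         if padding %2 !=0:
--             padding+=1
--             return symmetry_config_fix(kernel_size,stride,padding,dilation)
--         kernel_size = (2*padding + stride -1)//dilation + 1
--     if kernel_size==1 and stride==2 and padding == 0:
--         kernel_size =2
--     return kernel_size,stride,padding,dilation
-- ===== SOURCE B (Python) =====
-- def symmetry_config_fix(kernel_size, stride, padding, dilation):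
--     # iterative re-implementation: normalize params in one loop, then straight-line fixups
--     params = []
--     for x in (kernel_size, stride, padding, dilation):
--         if not isinstance(x, int):
--             assert x[0] == x[1]
--             x = x[0]
--         params.append(x)
--     kernel_size, stride, padding, dilation = params
--     if dilation > 1:
--         dilation = 1
--     if (kernel_size - 1) * dilation != 2 * padding + stride - 1:
--         if padding % 2 != 0:
--             padding += 1
--         if (kernel_size - 1) * dilation != 2 * padding + stride - 1:
--             kernel_size = (2 * padding + stride - 1) // dilation + 1
--     if kernel_size == 1 and stride == 2 and padding == 0:
--         kernel_size = 2
--     return kernel_size, stride, padding, dilation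
-- ===== Notes on version B (the rewrite author's own statement) =====
-- stated objective: simpler
-- what changed: Replaces A's self-recursion (re-entered after the dilation reset and after the odd-padding bump) with straight-line iterative code: normalize params in one loop, clamp dilation, bump odd padding, re-test the symmetry condition once, recompute kernel_size if it still fails, then apply the final special case.
import Mathlib
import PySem

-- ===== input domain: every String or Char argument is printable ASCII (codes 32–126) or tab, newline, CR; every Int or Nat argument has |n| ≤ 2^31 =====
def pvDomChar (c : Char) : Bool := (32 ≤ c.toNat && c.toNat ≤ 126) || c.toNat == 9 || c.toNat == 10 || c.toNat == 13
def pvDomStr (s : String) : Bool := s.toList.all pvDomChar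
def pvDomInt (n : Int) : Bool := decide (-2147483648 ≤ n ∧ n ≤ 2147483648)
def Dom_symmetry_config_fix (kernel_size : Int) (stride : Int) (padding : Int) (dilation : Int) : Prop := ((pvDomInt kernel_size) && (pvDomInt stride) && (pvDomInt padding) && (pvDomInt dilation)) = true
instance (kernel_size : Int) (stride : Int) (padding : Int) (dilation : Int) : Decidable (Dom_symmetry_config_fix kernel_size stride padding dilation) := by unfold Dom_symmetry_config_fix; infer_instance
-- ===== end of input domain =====

-- ===== PORT A =====
-- Port of A (args are ints here, so the isinstance/tuple normalization is the identity).
def symmetry_config_fix (kernel_size : Int) (stride : Int) (padding : Int) (dilation : Int) : Int × Int × Int × Int :=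
  if dilation > 1 then symmetry_config_fix kernel_size stride padding 1
  else if (kernel_size - 1) * dilation ≠ 2 * padding + stride - 1 then
    if PySem.Int.mod padding 2 ≠ 0 then
      symmetry_config_fix kernel_size stride (padding + 1) dilation
    else
      let kernel_size := PySem.Int.floordiv (2 * padding + stride - 1) dilation + 1
      if kernel_size = 1 ∧ stride = 2 ∧ padding = 0 then (2, stride, padding, dilation)
      else (kernel_size, stride, padding, dilation)
  else if kernel_size = 1 ∧ stride = 2 ∧ padding = 0 then (2, stride, padding, dilation)
  else (kernel_size, stride, padding, dilation)
termination_by (if dilation > 1 then 1 else 0) + (if PySem.Int.mod padding 2 ≠ 0 then 1 else 0)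
decreasing_by
  · simp only [PySem.Int.mod]
    split_ifs at * <;> omega
  · simp only [PySem.Int.mod_eq_emod_of_pos (show (0:Int) < 2 by norm_num)] at *
    split_ifs at * <;> omega

-- ===== PORT B =====
def symmetry_config_fix_alt (kernel_size : Int) (stride : Int) (padding : Int) (dilation : Int) : Int × Int × Int × Int :=
  let dilation := if dilation > 1 then 1 else dilation
  let kp : Int × Int :=
    if (kernel_size - 1) * dilation ≠ 2 * padding + stride - 1 then
      let padding := if PySem.Int.mod padding 2 ≠ 0 then padding + 1 else padding
      if (kernel_size - 1) * dilation ≠ 2 * padding + stride - 1 then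
        (PySem.Int.floordiv (2 * padding + stride - 1) dilation + 1, padding)
      else (kernel_size, padding)
    else (kernel_size, padding)
  let kernel_size := if kp.1 = 1 ∧ stride = 2 ∧ kp.2 = 0 then 2 else kp.1
  (kernel_size, stride, kp.2, dilation)

-- ===== PRECONDITION & SPEC =====
-- Pre_ excludes exactly the inputs where Python A raises ZeroDivisionError: effective
-- dilation 0 and the symmetry condition still failing after the odd-padding bump.
def Pre_symmetry_config_fix (kernel_size : Int) (stride : Int) (padding : Int) (dilation : Int) : Prop :=
  ¬ (dilation = 0 ∧ 2 * padding + stride - 1 ≠ 0 ∧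
     2 * (if PySem.Int.mod padding 2 ≠ 0 then padding + 1 else padding) + stride - 1 ≠ 0)
instance (kernel_size : Int) (stride : Int) (padding : Int) (dilation : Int) : Decidable (Pre_symmetry_config_fix kernel_size stride padding dilation) := by unfold Pre_symmetry_config_fix; infer_instance
def pvWitness_symmetry_config_fix : Int × Int × Int × Int := (3, 2, 1, 1)
def Spec_symmetry_config_fix (kernel_size : Int) (stride : Int) (padding : Int) (dilation : Int) (out : Int × Int × Int × Int) : Prop := out = symmetry_config_fix_alt kernel_size stride padding dilation
instance (kernel_size : Int) (stride : Int) (padding : Int) (dilation : Int) (out : Int × Int × Int × Int) : Decidable (Spec_symmetry_config_fix kernel_size stride padding dilation out) := by unfold Spec_symmetry_config_fix; infer_instance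

-- ===== CLAIM =====
def Claim_equal_symmetry_config_fix : Prop := ∀ (kernel_size : Int) (stride : Int) (padding : Int) (dilation : Int), Dom_symmetry_config_fix kernel_size stride padding dilation → Pre_symmetry_config_fix kernel_size stride padding dilation → Spec_symmetry_config_fix kernel_size stride padding dilation (symmetry_config_fix kernel_size stride padding dilation)

-- ===== LEMMAS AND PROOFS =====
theorem sym_eq (kernel_size stride padding dilation : Int) :
    symmetry_config_fix kernel_size stride padding dilation
    = if dilation > 1 then symmetry_config_fix kernel_size stride padding 1
      else if (kernel_size - 1) * dilation ≠ 2 * padding + stride - 1 then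
        if PySem.Int.mod padding 2 ≠ 0 then
          symmetry_config_fix kernel_size stride (padding + 1) dilation
        else
          let kernel_size := PySem.Int.floordiv (2 * padding + stride - 1) dilation + 1
          if kernel_size = 1 ∧ stride = 2 ∧ padding = 0 then (2, stride, padding, dilation)
          else (kernel_size, stride, padding, dilation)
      else if kernel_size = 1 ∧ stride = 2 ∧ padding = 0 then (2, stride, padding, dilation)
      else (kernel_size, stride, padding, dilation) := by
  rw [symmetry_config_fix]

theorem bump_even (p : Int) (h : PySem.Int.mod p 2 ≠ 0) : PySem.Int.mod (p + 1) 2 = 0 := by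
  rw [PySem.Int.mod_eq_emod_of_pos (by norm_num)] at *
  omega

theorem sym_core (k s p d : Int) (hd : ¬ d > 1) :
    symmetry_config_fix k s p d = symmetry_config_fix_alt k s p d := by
  rw [sym_eq, if_neg hd]
  unfold symmetry_config_fix_alt
  by_cases hp : PySem.Int.mod p 2 ≠ 0
  · by_cases hc : (k - 1) * d ≠ 2 * p + s - 1
    · rw [if_pos hc, if_pos hp, sym_eq k s (p + 1) d, if_neg hd]
      have hpe := bump_even p hp
      simp only [hd, hp, hpe, hc, ne_eq, not_false_eq_true, ite_not]
      split_ifs <;> first | rfl | omega | simp_all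
    · rw [if_neg hc]
      simp only [hc, ne_eq, ite_not]
      split_ifs <;> first | rfl | omega | simp_all
  · by_cases hc : (k - 1) * d ≠ 2 * p + s - 1
    · rw [if_pos hc]
      simp only [hc, hp, ne_eq, not_false_eq_true, ite_not]
      split_ifs <;> first | rfl | omega | simp_all
    · rw [if_neg hc]
      simp only [hc, ne_eq, ite_not]
      split_ifs <;> first | rfl | omega | simp_all

theorem alt_clamp (k s p d : Int) (hd : d > 1) :
    symmetry_config_fix_alt k s p d = symmetry_config_fix_alt k s p 1 := by
  unfold symmetry_config_fix_alt
  simp [hd]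

-- ===== VERDICT =====
theorem symmetry_config_fix_spec : Claim_equal_symmetry_config_fix := by
  intro k s p d _hdom _hpre
  unfold Spec_symmetry_config_fix
  by_cases hd : d > 1
  · rw [sym_eq, if_pos hd, alt_clamp k s p d hd, sym_core k s p 1 (by omega)]
  · exact sym_core k s p d hd
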